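-- pv_equiv track=rewrite | github.com/handyc/velour | datalift/model_generator.py | _common_table_prefix
-- ===== SOURCE A (Python) =====
-- from typing import List, Optional, Dict, Iterable
--
-- def _common_table_prefix(tables: Iterable[str]) -> str:
--     """Longest ``xxx_`` prefix shared by every table name. Returns
--     ``''`` if there's no shared prefix. Used by table_to_model_name
--     to strip Dolibarr-style `llx_`, WordPress-style `wp_`, Laravel
--     `lab_` etc. automatically — whenever the dump is uniformly
--     prefixed, the Python class names drop the overhead."""
--     tl = list(tables)
--     if not tl:
--         return ''
--     shortest = min(tl, key=len)
--     # Longest common prefix across the set…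
--     prefix = ''
--     for i, ch in enumerate(shortest):
--         if all(t[i] == ch for t in tl):
--             prefix = shortest[:i + 1]
--         else:
--             break
--     # …truncated at the last `_` so we don't chew partial words.
--     last_under = prefix.rfind('_')
--     return prefix[:last_under + 1] if last_under >= 0 else ''
-- ===== SOURCE B (Python) =====
-- def _common_table_prefix(tables):
--     tl = sorted(tables)
--     if not tl:
--         return ''
--     lo, hi = tl[0], tl[-1]
--     # common prefix of ALL strings == common prefix of the lexicographic
--     # extremes, so walk just those two.
--     i = 0
--     n = min(len(lo), len(hi))
--     while i < n and lo[i] == hi[i]: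
--         i += 1
--     prefix = lo[:i]
--     last_under = prefix.rfind('_')
--     return prefix[:last_under + 1] if last_under >= 0 else ''
-- ===== Notes on version B (the rewrite author's own statement) =====
-- stated objective: alternative
-- what changed: A scans the shortest name position by position, checking every table at each index; B sorts a copy of the list and computes the common prefix by walking only the two lexicographic extremes (sorted[0] and sorted[-1]), then applies the same last-underscore truncation.
import Mathlib
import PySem

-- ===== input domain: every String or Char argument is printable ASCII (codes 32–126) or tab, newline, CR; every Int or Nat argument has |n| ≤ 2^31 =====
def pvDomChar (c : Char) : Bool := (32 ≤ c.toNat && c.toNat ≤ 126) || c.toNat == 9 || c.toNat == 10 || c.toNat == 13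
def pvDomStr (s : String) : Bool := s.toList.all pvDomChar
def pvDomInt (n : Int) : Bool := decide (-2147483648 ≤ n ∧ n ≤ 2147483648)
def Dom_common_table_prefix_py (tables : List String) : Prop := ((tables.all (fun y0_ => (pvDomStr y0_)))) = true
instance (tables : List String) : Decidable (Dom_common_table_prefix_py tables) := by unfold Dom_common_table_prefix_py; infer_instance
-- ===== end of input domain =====

-- B replaces A's position-by-position scan (checking every table at each index of the
-- shortest name) by sorting a copy and walking only the two lexicographic extremes;
-- objective: alternative (a differently-shaped pass, same result).

-- ===== PORT A =====
-- `all(t[i] == ch for t in tl)`; on every reached call i indexes the shortest string,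
-- so i < len(t) for every t and `t.toList[i]?` is exactly Python's `t[i]` (no IndexError).
def pvAllEq (tl : List String) (i : Nat) (ch : Char) : Bool :=
  tl.all (fun t => t.toList[i]? == some ch)

-- the `for i, ch in enumerate(shortest): if all(...): prefix = shortest[:i+1] else: break` loop
def pvScan (tl : List String) (shortest : List Char) : Nat → List Char → List Char → List Char
  | _, [], pre => pre
  | i, ch :: rest, pre =>
    if pvAllEq tl i ch then
      pvScan tl shortest (i + 1) rest (PySem.List.slice shortest none (some ((i : Int) + 1)))
    else pre

-- the last two lines, identical in A and in Source B:
-- `last_under = prefix.rfind('_'); return prefix[:last_under+1] if last_under >= 0 else ''`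
def pvCut (pre : List Char) : String :=
  let lastUnder := PySem.Chars.rfind pre ['_']
  if 0 ≤ lastUnder then String.ofList (PySem.List.slice pre none (some (lastUnder + 1))) else ""

def common_table_prefix_py (tables : List String) : String :=
  if tables = [] then ""
  else
    match PySem.List.min? tables (fun t => PySem.Str.len t) with
    | none => ""   -- unreachable: tables ≠ [] here
    | some shortest => pvCut (pvScan tables shortest.toList 0 shortest.toList [])

-- ===== PORT B =====
-- the `while i < n and lo[i] == hi[i]: i += 1` walk of Source B: the final value of i
def pvWalk : List Char → List Char → Nat
  | a :: as, b :: bs => if a = b then pvWalk as bs + 1 else 0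
  | _, _ => 0

def common_table_prefix_py_alt (tables : List String) : String :=
  match PySem.List.sorted tables (fun t => t) false with   -- tl = sorted(tables)
  | [] => ""
  | lo :: rest =>
    let hi := (lo :: rest).getLast (by simp)               -- hi = tl[-1]
    let i := pvWalk lo.toList hi.toList
    pvCut (PySem.List.slice lo.toList none (some (i : Int)))   -- prefix = lo[:i]

-- ===== PRECONDITION & SPEC =====
def Spec_common_table_prefix_py (tables : List String) (out : String) : Prop := out = common_table_prefix_py_alt tables
instance (tables : List String) (out : String) : Decidable (Spec_common_table_prefix_py tables out) := by unfold Spec_common_table_prefix_py; infer_instance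

-- ===== CLAIM (what is proved, stated in full; the proofs are below) =====
def Claim_equal_common_table_prefix_py : Prop := ∀ (tables : List String), Dom_common_table_prefix_py tables → Spec_common_table_prefix_py tables (common_table_prefix_py tables)

-- ===== LEMMAS AND PROOFS =====

-- "l is a common prefix of every table name"
def pvCP (tables : List String) (l : List Char) : Prop := ∀ t ∈ tables, l <+: t.toList

theorem pv_prefix_getElem? {l t : List Char} (h : l <+: t) {k : Nat} (hk : k < l.length) :
    t[k]? = l[k]? := by
  rw [List.prefix_iff_eq_take] at h
  conv_rhs => rw [h]
  simp [hk]

theorem pv_prefix_antisymm {a b : List Char} (h1 : a <+: b) (h2 : b <+: a) : a = b :=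
  h1.eq_of_length (Nat.le_antisymm h1.length_le h2.length_le)

-- a list is a prefix of the walked common prefix iff it is a prefix of both strings
theorem pv_prefix_walk_iff (a b l : List Char) :
    l <+: a.take (pvWalk a b) ↔ l <+: a ∧ l <+: b := by
  induction a generalizing b l with
  | nil =>
    simp only [List.take_nil, List.prefix_nil]
    constructor
    · rintro rfl; exact ⟨rfl, List.nil_prefix⟩
    · rintro ⟨rfl, -⟩; rfl
  | cons x as ih =>
    cases b with
    | nil =>
      simp only [pvWalk, List.take_zero, List.prefix_nil]
      constructor
      · rintro rfl; exact ⟨List.nil_prefix, rfl⟩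
      · rintro ⟨-, rfl⟩; rfl
    | cons y bs =>
      by_cases hxy : x = y
      · subst hxy
        have hw : pvWalk (x :: as) (x :: bs) = pvWalk as bs + 1 := by simp [pvWalk]
        rw [hw, List.take_succ_cons]
        cases l with
        | nil => simp
        | cons z ls =>
          rw [List.cons_prefix_cons, List.cons_prefix_cons, List.cons_prefix_cons, ih bs ls]
          tauto
      · have hw : pvWalk (x :: as) (y :: bs) = 0 := by simp [pvWalk, hxy]
        rw [hw, List.take_zero]
        simp only [List.prefix_nil]
        constructor
        · rintro rfl; exact ⟨List.nil_prefix, List.nil_prefix⟩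
        · rintro ⟨h1, h2⟩
          cases l with
          | nil => rfl
          | cons z ls =>
            rw [List.cons_prefix_cons] at h1 h2
            exact absurd (h1.1.symm.trans h2.1) hxy

-- if a ≤ b ≤ c lexicographically then the walked prefix of a and c is a prefix of b
theorem pv_between (a b c : List Char)
    (hab : ¬ List.Lex (· < ·) b a) (hbc : ¬ List.Lex (· < ·) c b) :
    a.take (pvWalk a c) <+: b := by
  induction a generalizing b c with
  | nil => simp
  | cons x as ih =>
    cases c with
    | nil => simp [pvWalk]
    | cons y cs =>
      cases b with
      | nil => exact absurd List.Lex.nil hab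
      | cons z bs =>
        rw [List.cons_lex_cons_iff] at hab hbc
        push Not at hab hbc
        by_cases hxy : x = y
        · subst hxy
          have hzx : z = x := le_antisymm hbc.1 hab.1
          subst hzx
          have hw : pvWalk (z :: as) (z :: cs) = pvWalk as cs + 1 := by simp [pvWalk]
          rw [hw, List.take_succ_cons, List.cons_prefix_cons]
          exact ⟨rfl, ih bs cs (hab.2 rfl) (hbc.2 rfl)⟩
        · have hw : pvWalk (x :: as) (y :: cs) = 0 := by simp [pvWalk, hxy]
          simp [hw]

-- ----- A side: what pvScan computes -----

-- position j agrees across all tables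
def pvPd (tl : List String) (s : List Char) (j : Nat) : Prop := ∀ t ∈ tl, t.toList[j]? = s[j]?

theorem pv_allEq_iff (tl : List String) (s : List Char) {i : Nat} (hi : i < s.length) :
    pvAllEq tl i s[i] = true ↔ pvPd tl s i := by
  simp only [pvAllEq, List.all_eq_true, beq_iff_eq, pvPd]
  have hg : s[i]? = some s[i] := List.getElem?_eq_getElem hi
  constructor
  · intro h t ht; rw [h t ht, hg]
  · intro h t ht; rw [h t ht, hg]

theorem pv_scan_spec (tl : List String) (s : List Char) :
    ∀ (n i : Nat), s.length - i = n → i ≤ s.length →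
      ∃ k, i ≤ k ∧ k ≤ s.length ∧
        pvScan tl s i (s.drop i) (s.take i) = s.take k ∧
        (∀ j, i ≤ j → j < k → pvPd tl s j) ∧ (k = s.length ∨ ¬ pvPd tl s k) := by
  intro n
  induction n with
  | zero =>
    intro i h0 hle
    have hi : i = s.length := by omega
    refine ⟨i, le_refl i, hi.le, ?_, fun j h1 h2 => absurd h1 (by omega), Or.inl hi⟩
    rw [List.drop_eq_nil_of_le hi.ge]
    simp [pvScan]
  | succ n ih =>
    intro i h0 hle
    have hi : i < s.length := by omega
    rw [List.drop_eq_getElem_cons hi]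
    simp only [pvScan]
    by_cases hp : pvAllEq tl i s[i] = true
    · rw [if_pos hp]
      have htn : ((i : Int) + 1).toNat = i + 1 := by omega
      rw [PySem.List.slice_to s (by omega), htn]
      obtain ⟨k, hk1, hk2, hk3, hk4, hk5⟩ := ih (i + 1) (by omega) (by omega)
      refine ⟨k, by omega, hk2, hk3, ?_, hk5⟩
      intro j hj1 hj2
      rcases Nat.eq_or_lt_of_le hj1 with rfl | h
      · exact (pv_allEq_iff tl s hi).1 hp
      · exact hk4 j h hj2
    · rw [if_neg hp]
      exact ⟨i, le_refl i, hi.le, rfl, fun j h1 h2 => absurd h1 (by omega),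
        Or.inr (fun hPd => hp ((pv_allEq_iff tl s hi).2 hPd))⟩

theorem pv_common_of_pred {tl : List String} {s : List Char} {k : Nat}
    (hall : ∀ j, j < k → pvPd tl s j) : pvCP tl (s.take k) := by
  intro t ht
  have heq : s.take k = t.toList.take k := by
    apply List.ext_getElem?
    intro j
    simp only [List.getElem?_take]
    split_ifs with hj
    · exact (hall j hj t ht).symm
    · rfl
  rw [heq]
  exact List.take_prefix k t.toList

theorem pv_max_of_pred {tl : List String} {s : List Char} {k : Nat}
    (hmem : ∃ t0 ∈ tl, t0.toList = s)
    (hstop : k = s.length ∨ ¬ pvPd tl s k) :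
    ∀ l, pvCP tl l → l <+: s.take k := by
  intro l hl
  obtain ⟨t0, ht0, rfl⟩ := hmem
  have hls : l <+: t0.toList := hl t0 ht0
  have hlen : l.length ≤ k := by
    by_contra h
    rw [not_le] at h
    have hklen : k < t0.toList.length := lt_of_lt_of_le h hls.length_le
    have hPd : pvPd tl t0.toList k := by
      intro t ht
      rw [pv_prefix_getElem? (hl t ht) h, pv_prefix_getElem? hls h]
    rcases hstop with he | hn
    · omega
    · exact hn hPd
  rw [List.prefix_iff_eq_take.1 hls]
  exact List.take_prefix_take_left hlen

theorem pv_a_prefix_spec (tables : List String) (shortest : String)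
    (hmin : PySem.List.min? tables (fun t => PySem.Str.len t) = some shortest) :
    pvCP tables (pvScan tables shortest.toList 0 shortest.toList []) ∧
    ∀ l, pvCP tables l → l <+: pvScan tables shortest.toList 0 shortest.toList [] := by
  obtain ⟨k, -, -, hscan, hall, hstop⟩ :=
    pv_scan_spec tables shortest.toList shortest.toList.length 0 (by omega) (by omega)
  rw [List.drop_zero, List.take_zero] at hscan
  rw [hscan]
  exact ⟨pv_common_of_pred (fun j hj => hall j (Nat.zero_le j) hj),
    pv_max_of_pred ⟨shortest, PySem.List.min?_mem hmin, rfl⟩ hstop⟩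

-- ----- B side -----

theorem pv_le_string_not_lex {s t : String} (h : s ≤ t) :
    ¬ List.Lex (· < ·) t.toList s.toList := fun hlex =>
  absurd (String.lt_iff_toList_lt.2 hlex) (not_lt.2 h)

theorem pv_alt_prefix_spec (tables : List String) (lo : String) (rest : List String)
    (hs : PySem.List.sorted tables (fun t => t) false = lo :: rest) :
    pvCP tables (lo.toList.take (pvWalk lo.toList ((lo :: rest).getLast (by simp)).toList)) ∧
    ∀ l, pvCP tables l →
      l <+: lo.toList.take (pvWalk lo.toList ((lo :: rest).getLast (by simp)).toList) := by
  have hperm : (lo :: rest).Perm tables := hs ▸ PySem.List.sorted_perm tables (fun t => t) false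
  have hpw : List.Pairwise (· ≤ ·) (lo :: rest) := by
    have := PySem.List.sorted_pairwise tables (fun t => t)
    rw [hs] at this
    exact this
  set hi := (lo :: rest).getLast (by simp) with hhi
  have hlo_le : ∀ t ∈ (lo :: rest), lo ≤ t := by
    rw [List.pairwise_cons] at hpw
    intro t ht
    rcases List.mem_cons.1 ht with rfl | h
    · exact le_refl t
    · exact hpw.1 t h
  have hle_hi : ∀ t ∈ (lo :: rest), t ≤ hi := by
    intro t ht
    have hdec : (lo :: rest).dropLast ++ [hi] = lo :: rest :=
      List.dropLast_append_getLast (by simp)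
    rw [← hdec] at hpw ht
    rw [List.pairwise_append] at hpw
    rcases List.mem_append.1 ht with h | h
    · exact hpw.2.2 t h hi (by simp)
    · rw [List.mem_singleton.1 h]
  have hhi_mem : hi ∈ (lo :: rest) := List.getLast_mem (by simp)
  constructor
  · intro t ht
    have ht' : t ∈ (lo :: rest) := hperm.mem_iff.2 ht
    exact pv_between lo.toList t.toList hi.toList
      (pv_le_string_not_lex (hlo_le t ht')) (pv_le_string_not_lex (hle_hi t ht'))
  · intro l hl
    rw [pv_prefix_walk_iff]
    exact ⟨hl lo (hperm.mem_iff.1 (List.mem_cons_self)),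
           hl hi (hperm.mem_iff.1 hhi_mem)⟩

theorem pv_alt_eq_cons (tables : List String) (lo : String) (rest : List String)
    (hs : PySem.List.sorted tables (fun t => t) false = lo :: rest) :
    common_table_prefix_py_alt tables =
      pvCut (PySem.List.slice lo.toList none
        (some ((pvWalk lo.toList ((lo :: rest).getLast (by simp)).toList : Nat) : Int))) := by
  unfold common_table_prefix_py_alt
  rw [hs]

-- ===== VERDICT (by name: the statement is the Claim_ definition above) =====
theorem common_table_prefix_py_spec : Claim_equal_common_table_prefix_py := by
  unfold Claim_equal_common_table_prefix_py
  intro tables _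
  unfold Spec_common_table_prefix_py
  by_cases hnil : tables = []
  · subst hnil; rfl
  · obtain ⟨lo, rest, hs⟩ : ∃ lo rest,
        PySem.List.sorted tables (fun t => t) false = lo :: rest := by
      cases h : PySem.List.sorted tables (fun t => t) false with
      | nil => exact absurd ((PySem.List.sorted_eq_nil_iff tables (fun t => t) false).1 h) hnil
      | cons a b => exact ⟨a, b, rfl⟩
    cases hmin : PySem.List.min? tables (fun t => PySem.Str.len t) with
    | none =>
      exact absurd ((PySem.List.min?_eq_none_iff tables (fun t => PySem.Str.len t)).1 hmin) hnil
    | some shortest =>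
      unfold common_table_prefix_py
      rw [if_neg hnil, hmin, pv_alt_eq_cons tables lo rest hs]
      obtain ⟨hA1, hA2⟩ := pv_a_prefix_spec tables shortest hmin
      obtain ⟨hB1, hB2⟩ := pv_alt_prefix_spec tables lo rest hs
      show pvCut (pvScan tables shortest.toList 0 shortest.toList []) = _
      refine congrArg pvCut ?_
      rw [PySem.List.slice_to lo.toList (by omega), Int.toNat_natCast]
      exact pv_prefix_antisymm (hB2 _ hA1) (hA2 _ hB1)
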